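-- pv_equiv track=rewrite | github.com/shshsunny/fraction-reduction-algorithm-2018 | Source/Main program/v1.x/1.1/Generate.py | mcomfact
-- ===== SOURCE A (Python) =====
-- def mcomfact(N):  # 单个公因数幂次较大
--     # many common factor
--     base = 2*3*5*7*11
--     denoms = []
--     numers = []
--     for i in range(N):  # 生成N个分数
--         pow_denom = i+5
--         pow_numer = i+3
--         denoms.append(base**pow_denom)
--         numers.append(base**pow_numer)
--     return numers, denoms
-- ===== SOURCE B (Python) =====
-- def mcomfact(N):
--     # Incremental: each term is the previous term times the base; no full pow per step.
--     base = 2 * 3 * 5 * 7 * 11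
--     shift = base * base  # denom = numer * base**2
--     numers = []
--     denoms = []
--     num = base ** 3
--     for _ in range(N):
--         numers.append(num)
--         denoms.append(num * shift)
--         num *= base
--     return numers, denoms
-- ===== Notes on version B (the rewrite author's own statement) =====
-- stated objective: faster
-- what changed: Replaces the per-iteration base**(i+5)/base**(i+3) exponentiations with one running product multiplied by the base each step (denominator obtained from the numerator by a constant base**2 factor).
import Mathlib
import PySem

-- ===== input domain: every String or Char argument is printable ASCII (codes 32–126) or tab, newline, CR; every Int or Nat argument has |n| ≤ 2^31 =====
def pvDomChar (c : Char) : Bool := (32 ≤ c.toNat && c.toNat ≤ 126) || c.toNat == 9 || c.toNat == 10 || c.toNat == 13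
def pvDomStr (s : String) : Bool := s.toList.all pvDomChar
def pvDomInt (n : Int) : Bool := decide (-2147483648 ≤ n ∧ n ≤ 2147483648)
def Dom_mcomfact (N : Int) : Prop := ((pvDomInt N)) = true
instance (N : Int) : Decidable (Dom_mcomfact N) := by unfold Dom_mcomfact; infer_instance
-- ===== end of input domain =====

-- B replaces per-step exponentiation base**(i+5)/base**(i+3) by a running product ×base per step (faster).


-- ===== PORT A =====
-- Literal port: loop over range(N), appending base**(i+5) and base**(i+3) per step.
def mcomfact (N : Int) : List Int × List Int :=
  let base : Int := 2*3*5*7*11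
  let st := (PySem.List.pyRange 0 N 1).foldl
    (fun (st : List Int × List Int) i =>
      let pow_denom := i + 5
      let pow_numer := i + 3
      (st.1 ++ [base ^ pow_denom.toNat], st.2 ++ [base ^ pow_numer.toNat]))
    ([], [])
  (st.2, st.1)

-- ===== PORT B =====
-- Incremental loop: running numerator multiplied by base each step; denom = num * shift.
def mcomfactAltLoop (base shift : Int) (fuel : Nat) (num : Int)
    (numers denoms : List Int) : List Int × List Int :=
  match fuel with
  | 0 => (numers, denoms)
  | f + 1 => mcomfactAltLoop base shift f (num * base) (numers ++ [num]) (denoms ++ [num * shift])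

def mcomfact_alt (N : Int) : List Int × List Int :=
  let base : Int := 2*3*5*7*11
  let shift := base * base
  mcomfactAltLoop base shift N.toNat (base ^ 3) [] []

-- ===== PRECONDITION & SPEC =====
def Spec_mcomfact (N : Int) (out : List Int × List Int) : Prop := out = mcomfact_alt N
instance (N : Int) (out : List Int × List Int) : Decidable (Spec_mcomfact N out) := by unfold Spec_mcomfact; infer_instance

-- ===== CLAIM (what is proved, stated in full; the proofs are below) =====
def Claim_equal_mcomfact : Prop := ∀ (N : Int), Dom_mcomfact N → Spec_mcomfact N (mcomfact N)

-- ===== LEMMAS AND PROOFS =====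

-- B's loop unrolled to maps of powers.
theorem mcomfactAltLoop_eq (base shift : Int) (f : Nat) :
    ∀ (num : Int) (ns ds : List Int),
    mcomfactAltLoop base shift f num ns ds =
      (ns ++ (List.range f).map (fun k => num * base ^ k),
       ds ++ (List.range f).map (fun k => num * base ^ k * shift)) := by
  induction f with
  | zero => intro num ns ds; simp [mcomfactAltLoop]
  | succ f ih =>
    intro num ns ds
    rw [mcomfactAltLoop, ih]
    rw [List.range_succ_eq_map]
    simp only [List.map_cons, List.map_map, Prod.mk.injEq, pow_zero, mul_one,
      List.append_assoc, List.singleton_append]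
    refine ⟨?_, ?_⟩ <;>
    · congr 2
      apply List.map_congr_left
      intro k _
      simp only [Function.comp, pow_succ]
      ring

-- A's foldl unrolled to maps of powers.
theorem mcomfact_foldl_eq (base : Int) (l : List Int) :
    ∀ (ds ns : List Int),
    l.foldl (fun (st : List Int × List Int) i =>
        (st.1 ++ [base ^ (i + 5).toNat], st.2 ++ [base ^ (i + 3).toNat])) (ds, ns) =
      (ds ++ l.map (fun i => base ^ (i + 5).toNat),
       ns ++ l.map (fun i => base ^ (i + 3).toNat)) := by
  induction l with
  | nil => intro ds ns; simp
  | cons a l ih => intro ds ns; simp [List.foldl_cons, ih]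

theorem mcomfact_spec : Claim_equal_mcomfact := by
  intro N _
  unfold Spec_mcomfact mcomfact mcomfact_alt
  simp only []
  rw [PySem.List.pyRange_one, mcomfact_foldl_eq, mcomfactAltLoop_eq]
  simp only [List.nil_append, List.map_map, sub_zero]
  generalize (2*3*5*7*11 : Int) = b
  simp only [Prod.mk.injEq]
  refine ⟨?_, ?_⟩ <;>
  · apply List.map_congr_left
    intro k hk
    simp only [Function.comp]
    first
    | rw [show ((0 + (k:Int)) + 5).toNat = k + 5 by omega]
    | rw [show ((0 + (k:Int)) + 3).toNat = k + 3 by omega]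
    ring
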